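-- pv_equiv track=rewrite | github.com/specialsal/caiwu-agent | utu/context_compression/intelligent_compressor.py | _create_text_summary
-- ===== SOURCE A (Python) =====
-- from typing import Dict, Any, List, Optional, Tuple, Union
--
-- def _create_text_summary(content: Any, max_length: int = 500) -> str:
--     """创建文本摘要"""
--     if isinstance(content, dict):
--         text = content.get("raw_output", "") or str(content)
--     else:
--         text = str(content)
--
--     # 简单的文本摘要算法
--     sentences = [s.strip() for s in text.split('.') if s.strip()]
--
--     if len(text) <= max_length:
--         return text
--
--     # 选择前几个重要句子
--     summary_sentences = []
--     current_length = 0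
--
--     for sentence in sentences:
--         if current_length + len(sentence) + 1 <= max_length:
--             summary_sentences.append(sentence)
--             current_length += len(sentence) + 1
--         else:
--             break
--
--     return '. '.join(summary_sentences) + '.'
-- ===== SOURCE B (Python) =====
-- def _create_text_summary(content, max_length=500):
--     """Prefix sums + binary search instead of the greedy accumulator loop."""
--     if isinstance(content, dict):
--         text = content.get("raw_output", "") or str(content)
--     else:
--         text = str(content)
--
--     sentences = [s.strip() for s in text.split('.') if s.strip()]
--
--     if len(text) <= max_length:
--         return text
--
--     # cumulative lengths (each step adds len(s)+1 >= 1, so strictly increasing)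
--     cumulative = []
--     total = 0
--     for s in sentences:
--         total += len(s) + 1
--         cumulative.append(total)
--
--     k = _bisect_right(cumulative, max_length)
--     return '. '.join(sentences[:k]) + '.'
--
--
-- def _bisect_right(a, x):
--     lo, hi = 0, len(a)
--     while lo < hi:
--         mid = (lo + hi) // 2
--         if x < a[mid]:
--             hi = mid
--         else:
--             lo = mid + 1
--     return lo
-- ===== Notes on version B (the rewrite author's own statement) =====
-- stated objective: alternative
-- what changed: Replaces the greedy accumulator loop over sentences with precomputed cumulative lengths plus a bisect_right-style binary search that yields the count of sentences fitting the budget, then slices and joins that prefix.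
import Mathlib
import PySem

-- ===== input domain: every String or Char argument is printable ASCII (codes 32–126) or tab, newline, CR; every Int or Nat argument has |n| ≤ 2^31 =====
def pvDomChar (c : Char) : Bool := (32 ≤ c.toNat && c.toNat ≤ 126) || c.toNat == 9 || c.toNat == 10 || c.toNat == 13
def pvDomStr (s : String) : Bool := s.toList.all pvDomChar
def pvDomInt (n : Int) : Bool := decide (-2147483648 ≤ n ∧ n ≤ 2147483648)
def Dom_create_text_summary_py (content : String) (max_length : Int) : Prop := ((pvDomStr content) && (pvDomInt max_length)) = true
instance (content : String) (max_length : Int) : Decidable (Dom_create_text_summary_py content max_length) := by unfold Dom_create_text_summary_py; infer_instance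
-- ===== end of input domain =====

-- B replaces A's greedy accumulator loop by cumulative lengths + a bisect_right-style
-- binary search; same return value (content is a str here, so str(content) is the identity).

-- ===== PORT A =====
-- sentences = [s.strip() for s in text.split('.') if s.strip()]
-- (split? "." never returns none since the separator is nonempty; getD [] is unreachable)
def pvSentencesA (text : String) : List String :=
  (((PySem.Str.split? text ".").getD []).map PySem.Str.strip).filter (fun s => s ≠ "")

-- the greedy for-loop with `break`, building summary_sentences
def pvGreedyA (max_length : Int) (cur : Int) : List String → List String
  | [] => []
  | s :: rest =>
      if cur + PySem.Str.len s + 1 ≤ max_length then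
        s :: pvGreedyA max_length (cur + PySem.Str.len s + 1) rest
      else []

def create_text_summary_py (content : String) (max_length : Int) : String :=
  -- text = str(content) = content
  if PySem.Str.len content ≤ max_length then content
  else PySem.Str.join ". " (pvGreedyA max_length 0 (pvSentencesA content)) ++ "."

-- ===== PORT B =====
def pvSentencesB (text : String) : List String :=
  (((PySem.Str.split? text ".").getD []).map PySem.Str.strip).filter (fun s => s ≠ "")

-- cumulative lengths: total += len(s) + 1; cumulative.append(total)
def pvCumulative (total : Int) : List String → List Int
  | [] => []
  | s :: rest =>
      (total + PySem.Str.len s + 1) :: pvCumulative (total + PySem.Str.len s + 1) rest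

-- _bisect_right: textbook binary search (a[mid] is always in range when lo < hi ≤ len a)
def pvBisectRight (a : List Int) (x : Int) (lo hi : Nat) : Nat :=
  if lo < hi then
    if x < a.getD ((lo + hi) / 2) 0 then pvBisectRight a x lo ((lo + hi) / 2)
    else pvBisectRight a x ((lo + hi) / 2 + 1) hi
  else lo
termination_by hi - lo
decreasing_by all_goals omega

def create_text_summary_py_alt (content : String) (max_length : Int) : String :=
  if PySem.Str.len content ≤ max_length then content
  else
    PySem.Str.join ". "
      ((pvSentencesB content).take
        (pvBisectRight (pvCumulative 0 (pvSentencesB content)) max_length 0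
          (pvCumulative 0 (pvSentencesB content)).length)) ++ "."

-- ===== PRECONDITION & SPEC =====
def Spec_create_text_summary_py (content : String) (max_length : Int) (out : String) : Prop := out = create_text_summary_py_alt content max_length
instance (content : String) (max_length : Int) (out : String) : Decidable (Spec_create_text_summary_py content max_length out) := by unfold Spec_create_text_summary_py; infer_instance

-- ===== CLAIM (what is proved, stated in full; the proofs are below) =====
def Claim_equal_create_text_summary_py : Prop := ∀ (content : String) (max_length : Int), Dom_create_text_summary_py content max_length → Spec_create_text_summary_py content max_length (create_text_summary_py content max_length)

-- ===== LEMMAS AND PROOFS =====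

-- the element just past the takeWhile prefix falsifies the predicate
lemma takeWhile_first_failure {α : Type} (p : α → Bool) :
    ∀ (l : List α) (h : (l.takeWhile p).length < l.length),
      p (l[(l.takeWhile p).length]'h) = false := by
  intro l
  induction l with
  | nil => intro h; simp at h
  | cons a l ih =>
      intro h
      by_cases hp : p a = true
      · simp only [List.takeWhile_cons_of_pos hp, List.length_cons, List.getElem_cons_succ]
        exact ih (by simpa [List.takeWhile_cons_of_pos hp] using h)
      · simp only [List.takeWhile_cons_of_neg hp, List.length_nil, List.getElem_cons_zero]
        simpa using hp

-- every entry of the cumulative list exceeds the starting total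
lemma pvCumulative_mem_gt (ss : List String) : ∀ (c : Int) (y : Int),
    y ∈ pvCumulative c ss → c < y := by
  induction ss with
  | nil => intro c y h; simp [pvCumulative] at h
  | cons s rest ih =>
      intro c y h
      simp only [pvCumulative, List.mem_cons] at h
      have hlen : 0 ≤ PySem.Str.len s := by simp [PySem.Str.len_eq]
      rcases h with h | h
      · omega
      · have := ih _ _ h; omega

lemma pvCumulative_pairwise (ss : List String) : ∀ (c : Int),
    (pvCumulative c ss).Pairwise (· ≤ ·) := by
  induction ss with
  | nil => intro c; simp [pvCumulative]
  | cons s rest ih =>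
      intro c
      simp only [pvCumulative, List.pairwise_cons]
      exact ⟨fun y hy => le_of_lt (pvCumulative_mem_gt rest _ y hy), ih _⟩

-- the greedy loop takes exactly the prefix whose cumulative lengths stay ≤ max_length
lemma pvGreedyA_eq_take (max_length : Int) (ss : List String) : ∀ c,
    pvGreedyA max_length c ss
      = ss.take ((pvCumulative c ss).takeWhile (fun t => decide (t ≤ max_length))).length := by
  induction ss with
  | nil => intro c; simp [pvGreedyA, pvCumulative]
  | cons s rest ih =>
      intro c
      simp only [pvGreedyA, pvCumulative, List.takeWhile_cons]
      by_cases h : c + (s.length : Int) < max_length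
      · simp [h, ih]
      · simp [h]

-- binary-search correctness against the takeWhile length, for a ≤-sorted list
lemma pvBisectRight_eq (a : List Int) (x : Int) (hs : a.Pairwise (· ≤ ·)) :
    ∀ (n lo hi : Nat), hi - lo ≤ n →
      lo ≤ (a.takeWhile (fun t => decide (t ≤ x))).length →
      (a.takeWhile (fun t => decide (t ≤ x))).length ≤ hi →
      hi ≤ a.length →
      pvBisectRight a x lo hi = (a.takeWhile (fun t => decide (t ≤ x))).length := by
  have htle : (a.takeWhile (fun t => decide (t ≤ x))).length ≤ a.length :=
    (List.takeWhile_prefix _).length_le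
  have hmem : ∀ i (hi' : i < a.length),
      i < (a.takeWhile (fun t => decide (t ≤ x))).length → a[i] ≤ x := by
    intro i hi' hit
    have h1 := (List.takeWhile_prefix (l := a) (fun t => decide (t ≤ x))).getElem hit
    have h2 := List.mem_takeWhile_imp
      (List.getElem_mem (l := a.takeWhile (fun t => decide (t ≤ x))) hit)
    rw [h1] at h2
    simpa using h2
  have hnot : ∀ i (hi' : i < a.length),
      (a.takeWhile (fun t => decide (t ≤ x))).length ≤ i → ¬ a[i] ≤ x := by
    intro i hi' hti
    rcases Nat.eq_or_lt_of_le hti with rfl | hl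
    · have := takeWhile_first_failure (fun t => decide (t ≤ x)) a hi'
      simpa using this
    · have htlen : (a.takeWhile (fun t => decide (t ≤ x))).length < a.length := by omega
      have hle := (List.pairwise_iff_getElem.mp hs) _ i htlen hi' hl
      have hf := takeWhile_first_failure (fun t => decide (t ≤ x)) a htlen
      simp only [decide_eq_false_iff_not] at hf
      omega
  intro n
  induction n with
  | zero =>
      intro lo hi hn h1 h2 h3
      unfold pvBisectRight
      have : ¬ lo < hi := by omega
      simp only [this, if_false]
      omega
  | succ n ih =>
      intro lo hi hn h1 h2 h3
      unfold pvBisectRight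
      by_cases hlh : lo < hi
      · simp only [hlh, if_true]
        have hmlen : (lo + hi) / 2 < a.length := by omega
        have hget : a.getD ((lo + hi) / 2) 0 = a[(lo + hi) / 2] := by
          simp [List.getD, List.getElem?_eq_getElem hmlen]
        rw [hget]
        by_cases hc : x < a[(lo + hi) / 2]
        · have htm : (a.takeWhile (fun t => decide (t ≤ x))).length ≤ (lo + hi) / 2 := by
            by_contra hcon
            have := hmem _ hmlen (by omega)
            omega
          simp only [hc, if_true]
          exact ih lo ((lo + hi) / 2) (by omega) h1 htm (by omega)
        · have htm : (lo + hi) / 2 < (a.takeWhile (fun t => decide (t ≤ x))).length := by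
            by_contra hcon
            exact hnot _ hmlen (by omega) (by omega)
          simp only [hc, if_false]
          exact ih ((lo + hi) / 2 + 1) hi (by omega) (by omega) h2 h3
      · simp only [hlh, if_false]
        omega

-- ===== VERDICT (by name: the statement is the Claim_ definition above) =====
theorem create_text_summary_py_spec : Claim_equal_create_text_summary_py := by
  intro content max_length _
  unfold Spec_create_text_summary_py create_text_summary_py create_text_summary_py_alt
  split_ifs with h
  · rfl
  · have hAB : pvSentencesA content = pvSentencesB content := rfl
    rw [hAB, pvGreedyA_eq_take,
        pvBisectRight_eq (pvCumulative 0 (pvSentencesB content)) max_length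
          (pvCumulative_pairwise _ _) (pvCumulative 0 (pvSentencesB content)).length 0
          (pvCumulative 0 (pvSentencesB content)).length (by omega) (by omega)
          ((List.takeWhile_prefix _).length_le) le_rfl]
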